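-- pv_equiv track=rewrite | github.com/finopsfoundation/focus_validator | focus_validator/outputter/outputter_web.py | _determine_column_status
-- ===== SOURCE A (Python) =====
-- def _determine_column_status(requirements: list) -> str:
--     """Determine overall column status based on requirements"""
--     if not requirements:
--         return "not"
--
--     passed_count = sum(1 for req in requirements if req["passed"])
--     total_count = len(requirements)
--
--     if passed_count == 0:
--         return "not"
--     elif passed_count == total_count:
--         return "fully"
--     else:
--         return "partial"
-- ===== SOURCE B (Python) =====
-- def _determine_column_status(requirements: list) -> str:
--     """Determine overall column status based on requirements"""
--     if not requirements:
--         return "not"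
--     it = iter(requirements)
--     status = "fully" if next(it)["passed"] else "not"
--     for req in it:
--         s = "fully" if req["passed"] else "not"
--         if s != status:
--             status = "partial"
--     return status
-- ===== Notes on version B (the rewrite author's own statement) =====
-- stated objective: alternative
-- what changed: Replaces the passed-count accumulator and count-vs-total comparison with a fold over a three-valued status semilattice: each requirement is classified as 'fully'/'not' and statuses are merged with a join (equal statuses keep, unequal collapse to 'partial').
import Mathlib
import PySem

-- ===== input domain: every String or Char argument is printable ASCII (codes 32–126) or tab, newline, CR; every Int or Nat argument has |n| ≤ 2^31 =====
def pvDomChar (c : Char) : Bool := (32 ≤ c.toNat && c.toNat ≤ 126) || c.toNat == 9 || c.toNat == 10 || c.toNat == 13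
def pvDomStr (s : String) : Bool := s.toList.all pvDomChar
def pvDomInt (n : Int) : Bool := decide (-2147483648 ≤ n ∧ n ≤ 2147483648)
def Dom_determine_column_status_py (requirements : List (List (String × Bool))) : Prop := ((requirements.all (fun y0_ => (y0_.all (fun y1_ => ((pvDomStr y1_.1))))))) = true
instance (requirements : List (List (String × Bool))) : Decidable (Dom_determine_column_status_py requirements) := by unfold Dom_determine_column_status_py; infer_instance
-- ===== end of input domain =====

-- B replaces A's passed-count-vs-total comparison with a fold over a three-valued status semilattice (join of per-requirement statuses); same cost, different decomposition.


-- req["passed"]: first-match association-list lookup; 'none' would be Python's KeyError (excluded by Pre_)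
def pvPassed (req : List (String × Bool)) : Bool := (req.lookup "passed").getD false

-- ===== PORT A =====
def determine_column_status_py (requirements : List (List (String × Bool))) : String :=
  if requirements = [] then "not"
  else
    let passed_count : Int := requirements.foldl (fun acc req => if pvPassed req then acc + 1 else acc) 0
    let total_count : Int := requirements.length
    if passed_count = 0 then "not"
    else if passed_count = total_count then "fully"
    else "partial"

-- ===== PORT B =====
-- per-requirement status
def pvElemStatus (req : List (String × Bool)) : String := if pvPassed req then "fully" else "not"

def determine_column_status_py_alt (requirements : List (List (String × Bool))) : String :=
  match requirements with
  | [] => "not"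
  | first :: rest =>
    rest.foldl (fun status req =>
      let s := pvElemStatus req
      if s ≠ status then "partial" else status) (pvElemStatus first)

-- ===== PRECONDITION & SPEC =====
-- Pre_ excludes requirement dicts missing the "passed" key, on which A (and B) raise KeyError
def Pre_determine_column_status_py (requirements : List (List (String × Bool))) : Prop :=
  ∀ req ∈ requirements, (req.lookup "passed").isSome = true
instance (requirements : List (List (String × Bool))) : Decidable (Pre_determine_column_status_py requirements) := by unfold Pre_determine_column_status_py; infer_instance
def pvWitness_determine_column_status_py : (List (List (String × Bool))) := [[("passed", true)], [("passed", false)]]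
def Spec_determine_column_status_py (requirements : List (List (String × Bool))) (out : String) : Prop := out = determine_column_status_py_alt requirements
instance (requirements : List (List (String × Bool))) (out : String) : Decidable (Spec_determine_column_status_py requirements out) := by unfold Spec_determine_column_status_py; infer_instance

-- ===== CLAIM (what is proved, stated in full; the proofs are below) =====
def Claim_equal_determine_column_status_py : Prop := ∀ (requirements : List (List (String × Bool))), Dom_determine_column_status_py requirements → Pre_determine_column_status_py requirements → Spec_determine_column_status_py requirements (determine_column_status_py requirements)

-- ===== LEMMAS AND PROOFS =====

def pvJoinStep (status : String) (req : List (String × Bool)) : String :=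
  let s := pvElemStatus req
  if s ≠ status then "partial" else status

theorem pvCount_eq_countP (l : List (List (String × Bool))) :
    l.foldl (fun acc req => if pvPassed req then acc + 1 else acc) (0 : Int)
      = (l.countP pvPassed : Int) := by
  suffices h : ∀ (a : Int), l.foldl (fun acc req => if pvPassed req then acc + 1 else acc) a
      = a + (l.countP pvPassed : Int) by simpa using h 0
  induction l with
  | nil => simp
  | cons x xs ih =>
    intro a
    by_cases hx : pvPassed x = true <;>
      simp [List.foldl, hx, ih]; ring

theorem pvFold_partial (l : List (List (String × Bool))) :
    l.foldl pvJoinStep "partial" = "partial" := by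
  induction l with
  | nil => rfl
  | cons x xs ih =>
    have hs : pvJoinStep "partial" x = "partial" := by
      unfold pvJoinStep pvElemStatus
      by_cases h : pvPassed x = true <;> simp [h]
    simpa [List.foldl, hs] using ih

theorem pvFold_fully (l : List (List (String × Bool))) :
    l.foldl pvJoinStep "fully" = (if l.all pvPassed then "fully" else "partial") := by
  induction l with
  | nil => rfl
  | cons x xs ih =>
    by_cases h : pvPassed x = true
    · have hs : pvJoinStep "fully" x = "fully" := by
        unfold pvJoinStep pvElemStatus; simp [h]
      simp [List.foldl, hs, ih, h]
    · have hs : pvJoinStep "fully" x = "partial" := by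
        unfold pvJoinStep pvElemStatus; simp [h]
      simp [List.foldl, hs, pvFold_partial, h]

theorem pvFold_not (l : List (List (String × Bool))) :
    l.foldl pvJoinStep "not" = (if l.all (fun r => !pvPassed r) then "not" else "partial") := by
  induction l with
  | nil => rfl
  | cons x xs ih =>
    by_cases h : pvPassed x = true
    · have hs : pvJoinStep "not" x = "partial" := by
        unfold pvJoinStep pvElemStatus; simp [h]
      simp [List.foldl, hs, pvFold_partial, h]
    · have hs : pvJoinStep "not" x = "not" := by
        unfold pvJoinStep pvElemStatus; simp [h]
      simp [List.foldl, hs, ih, h]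

-- ===== VERDICT (by name: the statement is the Claim_ definition above) =====
theorem determine_column_status_py_spec : Claim_equal_determine_column_status_py := by
  intro reqs _ _
  unfold Spec_determine_column_status_py determine_column_status_py determine_column_status_py_alt
  match reqs with
  | [] => rfl
  | first :: rest =>
    simp only [reduceCtorEq, if_false]
    rw [pvCount_eq_countP]
    have hfold : ∀ init, rest.foldl (fun status req =>
        let s := pvElemStatus req
        if s ≠ status then "partial" else status) init = rest.foldl pvJoinStep init := by
      intro init; rfl
    rw [hfold]
    by_cases h : pvPassed first = true
    · have he : pvElemStatus first = "fully" := by unfold pvElemStatus; simp [h]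
      rw [he, pvFold_fully]
      by_cases hall : rest.all pvPassed = true
      · -- every element passes: count = length
        have hcount : (first :: rest).countP pvPassed = (first :: rest).length := by
          rw [List.countP_eq_length]
          intro a ha
          rcases List.mem_cons.mp ha with rfl | ha'
          · exact h
          · exact (List.all_eq_true.mp hall) a ha'
        rw [if_neg (by rw [hcount]; simp; omega),
            if_pos (by rw [hcount]), if_pos hall]
      · -- some pass (first does), not all
        obtain ⟨x, hx, hpx⟩ : ∃ x ∈ rest, pvPassed x ≠ true := by
          simpa using hall
        have hpos : 0 < (first :: rest).countP pvPassed :=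
          List.countP_pos_iff.mpr ⟨first, List.mem_cons_self, h⟩
        have hlt : (first :: rest).countP pvPassed < (first :: rest).length := by
          rcases Nat.lt_or_ge ((first :: rest).countP pvPassed) (first :: rest).length with hl | hg
          · exact hl
          · exfalso
            have hle := List.countP_le_length (l := first :: rest) (p := pvPassed)
            have heq := le_antisymm hle hg
            exact hpx ((List.countP_eq_length.mp heq) x (List.mem_cons_of_mem _ hx))
        rw [if_neg (by exact_mod_cast Nat.pos_iff_ne_zero.mp hpos),
            if_neg (by exact_mod_cast Nat.ne_of_lt hlt), if_neg hall]
    · have he : pvElemStatus first = "not" := by unfold pvElemStatus; simp [h]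
      rw [he, pvFold_not]
      by_cases hnone : rest.all (fun r => !pvPassed r) = true
      · have hzero : (first :: rest).countP pvPassed = 0 := by
          rw [List.countP_eq_zero]
          intro a ha hpa
          rcases List.mem_cons.mp ha with rfl | ha'
          · exact h hpa
          · have := (List.all_eq_true.mp hnone) a ha'
            simp [hpa] at this
        rw [if_pos (by rw [hzero]; rfl), if_pos hnone]
      · -- some pass (not first), not all
        obtain ⟨x, hx, hpx⟩ : ∃ x ∈ rest, pvPassed x = true := by
          simpa using hnone
        have hpos : 0 < (first :: rest).countP pvPassed :=
          List.countP_pos_iff.mpr ⟨x, List.mem_cons_of_mem _ hx, hpx⟩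
        have hlt : (first :: rest).countP pvPassed < (first :: rest).length := by
          rcases Nat.lt_or_ge ((first :: rest).countP pvPassed) (first :: rest).length with hl | hg
          · exact hl
          · exfalso
            have hle := List.countP_le_length (l := first :: rest) (p := pvPassed)
            have heq := le_antisymm hle hg
            exact h ((List.countP_eq_length.mp heq) first List.mem_cons_self)
        rw [if_neg (by exact_mod_cast Nat.pos_iff_ne_zero.mp hpos),
            if_neg (by exact_mod_cast Nat.ne_of_lt hlt), if_neg hnone]
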